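-- pv_equiv track=rewrite | github.com/bomunteanu/asenix | scripts/recompute_pheromones.py | conditions_equivalent
-- ===== SOURCE A (Python) =====
-- REQUIRED_KEYS    = {"num_blocks", "base_channels"}  # from condition_registry
--
-- def conditions_equivalent(c1, c2):
--     """True if atoms are comparable (share at least one required key) AND
--     equivalent (ALL shared keys match — not just required ones).
--     Mirrors conditions_shared_keys_equivalent in embedding_queue.rs."""
--     if not c1 or not c2:
--         return False
--     # Must share at least one required key to be comparable
--     shared_req = REQUIRED_KEYS & set(c1.keys()) & set(c2.keys())
--     if not shared_req:
--         return False
--     # ALL shared keys (including non-required) must match exactly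
--     shared_all = set(c1.keys()) & set(c2.keys())
--     return all(str(c1[k]) == str(c2[k]) for k in shared_all)
-- ===== SOURCE B (Python) =====
-- REQUIRED_KEYS = {"num_blocks", "base_channels"}
--
-- def conditions_equivalent(c1, c2):
--     if not c1 or not c2:
--         return False
--     saw_required = False
--     for k, v in c1.items():
--         if k in c2:
--             if str(v) != str(c2[k]):
--                 return False
--             if k in REQUIRED_KEYS:
--                 saw_required = True
--     return saw_required
-- ===== Notes on version B (the rewrite author's own statement) =====
-- stated objective: alternative
-- what changed: Replaces A's two set intersections plus an all() comprehension over the shared-key set with a single fused pass over c1's items that compares each shared key's values immediately (early exit on mismatch) while accumulating a saw_required flag.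
import Mathlib
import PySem

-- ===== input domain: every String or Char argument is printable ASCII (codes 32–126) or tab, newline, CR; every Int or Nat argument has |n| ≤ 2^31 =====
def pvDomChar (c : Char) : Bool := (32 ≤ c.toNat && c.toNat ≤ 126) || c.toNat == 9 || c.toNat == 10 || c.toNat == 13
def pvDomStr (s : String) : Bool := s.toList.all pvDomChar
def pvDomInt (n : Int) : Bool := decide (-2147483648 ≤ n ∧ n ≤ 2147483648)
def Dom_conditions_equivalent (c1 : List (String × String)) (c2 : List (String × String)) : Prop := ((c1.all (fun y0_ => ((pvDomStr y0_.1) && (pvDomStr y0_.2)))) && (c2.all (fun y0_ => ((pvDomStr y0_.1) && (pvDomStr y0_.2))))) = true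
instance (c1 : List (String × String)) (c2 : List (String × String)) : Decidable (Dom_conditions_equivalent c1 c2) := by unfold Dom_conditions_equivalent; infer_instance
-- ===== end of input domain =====

-- B fuses A's two set intersections and all() comprehension into one pass over c1's
-- items with a saw_required flag (objective: alternative decomposition, same cost).


-- module constant REQUIRED_KEYS = {"num_blocks", "base_channels"}
def REQUIRED_KEYS : PySem.Set String := PySem.Set.ofList ["num_blocks", "base_channels"]

-- ===== PORT A =====
-- the dict arguments arrive as association lists; dict semantics = PySem.Dict.ofList
def conditions_equivalent (c1 : List (String × String)) (c2 : List (String × String)) : Bool :=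
  let d1 := PySem.Dict.ofList c1
  let d2 := PySem.Dict.ofList c2
  if d1.size == 0 || d2.size == 0 then false   -- if not c1 or not c2
  else
    let s1 := PySem.Set.ofList d1.keys          -- set(c1.keys())
    let s2 := PySem.Set.ofList d2.keys          -- set(c2.keys())
    let sharedReq := PySem.Set.inter (PySem.Set.inter REQUIRED_KEYS s1) s2
    if sharedReq.isEmpty then false             -- if not shared_req
    else
      let sharedAll := PySem.Set.inter s1 s2
      -- all(str(c1[k]) == str(c2[k]) for k in shared_all); values are strings, str is identity;
      -- k is a shared key so the getD default "" is unreachable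
      sharedAll.all (fun k => d1.getD k "" == d2.getD k "")

-- ===== PORT B =====
-- the fused loop: for (k, v) in c1.items(): if k in c2: compare values, track saw_required
def altGo (d2 : PySem.Dict String String) : List (String × String) → Bool → Bool
  | [], saw => saw
  | (k, v) :: rest, saw =>
    if d2.contains k then
      -- c2[k]: k in c2 just checked, so the getD default "" is unreachable
      if v != d2.getD k "" then false
      else altGo d2 rest (saw || REQUIRED_KEYS.contains k)
    else altGo d2 rest saw

def conditions_equivalent_alt (c1 : List (String × String)) (c2 : List (String × String)) : Bool :=
  let d1 := PySem.Dict.ofList c1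
  let d2 := PySem.Dict.ofList c2
  if d1.size == 0 || d2.size == 0 then false   -- if not c1 or not c2
  else altGo d2 d1.items false

-- ===== PRECONDITION & SPEC =====
def Spec_conditions_equivalent (c1 : List (String × String)) (c2 : List (String × String)) (out : Bool) : Prop := out = conditions_equivalent_alt c1 c2
instance (c1 : List (String × String)) (c2 : List (String × String)) (out : Bool) : Decidable (Spec_conditions_equivalent c1 c2 out) := by unfold Spec_conditions_equivalent; infer_instance

-- ===== CLAIM (what is proved, stated in full; the proofs are below) =====
def Claim_equal_conditions_equivalent : Prop := ∀ (c1 : List (String × String)) (c2 : List (String × String)), Dom_conditions_equivalent c1 c2 → Spec_conditions_equivalent c1 c2 (conditions_equivalent c1 c2)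

-- ===== LEMMAS AND PROOFS =====

-- the fused loop equals "all shared keys match" AND "saw ∨ some shared required key"
theorem altGo_eq (d2 : PySem.Dict String String) (items : List (String × String)) (saw : Bool) :
    altGo d2 items saw =
      (items.all (fun p => !(d2.contains p.1) || (p.2 == d2.getD p.1 "")) &&
       (saw || items.any (fun p => d2.contains p.1 && REQUIRED_KEYS.contains p.1))) := by
  induction items generalizing saw with
  | nil => simp [altGo]
  | cons p rest ih =>
    obtain ⟨k, v⟩ := p
    by_cases hc : d2.contains k = true
    · by_cases hv : v = d2.getD k ""
      · simp [altGo, hc, hv, ih, Bool.or_assoc]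
      · simp [altGo, hc, hv, bne_iff_ne]
    · simp at hc
      simp [altGo, hc, ih]

theorem conditions_equivalent_spec : Claim_equal_conditions_equivalent := by
  intro c1 c2 _
  unfold Spec_conditions_equivalent conditions_equivalent conditions_equivalent_alt
  set d1 := PySem.Dict.ofList c1 with hd1
  set d2 := PySem.Dict.ofList c2 with hd2
  by_cases hg : (d1.size == 0 || d2.size == 0) = true
  · simp [hg]
  · simp only [hg, Bool.false_eq_true, not_false_eq_true, if_neg]
    have nd1 : d1.keys.Nodup := PySem.Dict.nodup_keys_ofList c1
    have nd2 : d2.keys.Nodup := PySem.Dict.nodup_keys_ofList c2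
    rw [PySem.Set.ofList_eq_self_of_nodup _ nd1, PySem.Set.ofList_eq_self_of_nodup _ nd2,
        altGo_eq]
    -- a key of d1 is the first component of an item whose value is its getD
    have hkv : ∀ k, k ∈ d1.keys → (k, d1.getD k "") ∈ d1.items := by
      intro k hk
      have hc : d1.contains k = true := (PySem.Dict.contains_iff_mem_keys d1 k).mpr hk
      rw [PySem.Dict.contains_eq_isSome_get?] at hc
      obtain ⟨v, hv⟩ := Option.isSome_iff_exists.mp hc
      have hg2 : d1.getD k "" = v := by simp [PySem.Dict.getD_eq_get?_getD, hv]
      rw [hg2]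
      exact PySem.Dict.mem_items_of_get?_eq_some _ hv
    by_cases he : (PySem.Set.inter (PySem.Set.inter REQUIRED_KEYS d1.keys) d2.keys).isEmpty = true
    · -- no shared required key: A is false; B's any-part is false
      rw [if_pos he]
      rw [List.isEmpty_iff, List.eq_nil_iff_forall_not_mem] at he
      have hany : d1.items.any (fun p => d2.contains p.1 && REQUIRED_KEYS.contains p.1) = false := by
        rw [Bool.eq_false_iff]
        intro h
        obtain ⟨p, hp, hpc⟩ := List.any_eq_true.mp h
        rw [Bool.and_eq_true] at hpc
        obtain ⟨hpc2, hpr⟩ := hpc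
        exact he p.1 ((PySem.Set.mem_inter _ _ _).mpr
          ⟨(PySem.Set.mem_inter _ _ _).mpr
            ⟨(PySem.Set.contains_iff _ _).mp hpr, PySem.Dict.mem_keys_of_mem_items _ hp⟩,
           (PySem.Dict.contains_iff_mem_keys d2 p.1).mp hpc2⟩)
      rw [hany, Bool.or_false, Bool.and_false]
    · -- a shared required key exists: A = all over shared keys, B = all over items
      rw [if_neg he]
      have hany : d1.items.any (fun p => d2.contains p.1 && REQUIRED_KEYS.contains p.1) = true := by
        rw [List.isEmpty_iff] at he
        obtain ⟨x, hx⟩ := List.exists_mem_of_ne_nil _ he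
        obtain ⟨hx12, hx2⟩ := (PySem.Set.mem_inter _ _ _).mp hx
        obtain ⟨hxr, hx1⟩ := (PySem.Set.mem_inter _ _ _).mp hx12
        refine List.any_eq_true.mpr ⟨(x, d1.getD x ""), hkv x hx1, ?_⟩
        rw [Bool.and_eq_true]
        exact ⟨(PySem.Dict.contains_iff_mem_keys d2 x).mpr hx2, (PySem.Set.contains_iff _ _).mpr hxr⟩
      rw [hany, Bool.or_true, Bool.and_true]
      -- the two "all"s agree
      rw [Bool.eq_iff_iff, List.all_eq_true, List.all_eq_true]
      constructor
      · intro hA p hp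
        by_cases hc2 : d2.contains p.1 = true
        · have hs : p.1 ∈ PySem.Set.inter d1.keys d2.keys := (PySem.Set.mem_inter _ _ _).mpr
            ⟨PySem.Dict.mem_keys_of_mem_items _ hp, (PySem.Dict.contains_iff_mem_keys d2 p.1).mp hc2⟩
          have := hA _ hs
          have hv : d1.getD p.1 "" = p.2 := PySem.Dict.getD_of_mem_items _ hp nd1 _
          simp only [hv] at this
          simp [this]
        · simp [hc2]
      · intro hB k hk
        obtain ⟨hk1, hk2⟩ := (PySem.Set.mem_inter _ _ _).mp hk
        have := hB _ (hkv k hk1)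
        have hc2 : d2.contains k = true := (PySem.Dict.contains_iff_mem_keys d2 k).mpr hk2
        simpa [hc2] using this
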